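-- pv_equiv track=rewrite | github.com/kopunch88-maker/visa-kit | backend/app/services/transliteration.py | _to_title_case
-- ===== SOURCE A (Python) =====
-- def _to_title_case(text: str) -> str:
--     """Title Case с разделителями пробел/дефис."""
--     if not text:
--         return ""
--
--     result = []
--     current_word = []
--     for char in text:
--         if char in (" ", "-", "'"):
--             if current_word:
--                 word = "".join(current_word)
--                 result.append(word.capitalize())
--                 current_word = []
--             result.append(char)
--         else:
--             current_word.append(char)
--     if current_word:
--         word = "".join(current_word)
--         result.append(word.capitalize())
--
--     return "".join(result)
-- ===== SOURCE B (Python) =====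
-- def _to_title_case(text: str) -> str:
--     """Title Case with space/hyphen/apostrophe separators: pointwise map —
--     a char is uppercased iff the previous char (sentinel ' ' at the start)
--     is a separator, lowercased otherwise; separators are fixed points of both."""
--     seps = " -'"
--     return "".join(
--         c.upper() if p in seps else c.lower()
--         for p, c in zip(" " + text, text)
--     )
-- ===== Notes on version B (the rewrite author's own statement) =====
-- stated objective: idiomatic
-- what changed: B drops A's word-buffer-and-flush loop entirely: it zips the text with itself shifted by one (sentinel ' ') and maps each char pointwise to upper if its predecessor is a separator, else lower.
import Mathlib
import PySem

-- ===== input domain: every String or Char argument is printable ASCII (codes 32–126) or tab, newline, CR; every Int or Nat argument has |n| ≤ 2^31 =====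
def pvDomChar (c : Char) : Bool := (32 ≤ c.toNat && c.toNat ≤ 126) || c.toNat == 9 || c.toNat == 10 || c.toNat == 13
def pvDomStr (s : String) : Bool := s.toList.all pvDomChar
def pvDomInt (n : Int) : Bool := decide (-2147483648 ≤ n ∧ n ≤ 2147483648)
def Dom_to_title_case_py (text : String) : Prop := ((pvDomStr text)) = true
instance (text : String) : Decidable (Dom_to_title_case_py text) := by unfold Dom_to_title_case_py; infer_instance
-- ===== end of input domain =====

-- B replaces A's word-buffering loop with a pointwise map: each char is paired with
-- its predecessor (sentinel ' ') and upper/lower-cased by that alone; same cost.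

-- Python's `ch in (" ", "-", "'")` / `ch in " -'"` (both sources contain this test)
def sepB (c : Char) : Bool := c == ' ' || c == '-' || c == '\''

-- ===== PORT A =====
-- str.capitalize (ASCII-exact on Dom)
def pyCapitalize (w : List Char) : List Char :=
  match w with
  | [] => []
  | c :: rest => PySem.Chars.upperChar c :: rest.map PySem.Chars.lowerChar

-- one foldl step = one iteration of A's `for char in text` (state: result, current_word)
def stepA (st : List (List Char) × List Char) (c : Char) : List (List Char) × List Char :=
  if sepB c then
    ((if st.2.isEmpty then st.1 else st.1 ++ [pyCapitalize st.2]) ++ [[c]], [])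
  else (st.1, st.2 ++ [c])

def to_title_case_py (text : String) : String :=
  if text = "" then ""
  else
    let st := text.toList.foldl stepA ([], [])
    let result := if st.2.isEmpty then st.1 else st.1 ++ [pyCapitalize st.2]
    String.mk result.flatten   -- "".join(result)

-- ===== PORT B =====
-- zip(" " + text, text), then map: upper if predecessor is a separator, else lower
def to_title_case_py_alt (text : String) : String :=
  String.mk (((' ' :: text.toList).zip text.toList).map
    (fun pc => if sepB pc.1 then PySem.Chars.upperChar pc.2 else PySem.Chars.lowerChar pc.2))

-- ===== PRECONDITION & SPEC =====
def Spec_to_title_case_py (text : String) (out : String) : Prop := out = to_title_case_py_alt text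
instance (text : String) (out : String) : Decidable (Spec_to_title_case_py text out) := by unfold Spec_to_title_case_py; infer_instance

-- ===== CLAIM =====
def Claim_equal_to_title_case_py : Prop := ∀ (text : String), Dom_to_title_case_py text → Spec_to_title_case_py text (to_title_case_py text)

-- ===== LEMMAS AND PROOFS =====

-- B's map, written as a recursion carrying the previous character
def rendB (p : Char) : List Char → List Char
  | [] => []
  | c :: cs => (if sepB p then PySem.Chars.upperChar c else PySem.Chars.lowerChar c) :: rendB c cs

theorem zip_map_eq_rendB (cs : List Char) : ∀ (p : Char),
    ((p :: cs).zip cs).map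
      (fun pc => if sepB pc.1 then PySem.Chars.upperChar pc.2 else PySem.Chars.lowerChar pc.2)
      = rendB p cs := by
  induction cs with
  | nil => intro p; simp [rendB]
  | cons c cs ih =>
      intro p
      have h : (p :: c :: cs).zip (c :: cs) = (p, c) :: (c :: cs).zip cs := rfl
      rw [h, List.map_cons, ih c, rendB]

theorem sep_fixed (c : Char) (hc : sepB c = true) :
    PySem.Chars.upperChar c = c ∧ PySem.Chars.lowerChar c = c := by
  simp [sepB] at hc
  rcases hc with (h | h) | h <;> subst h <;> exact ⟨by decide, by decide⟩

-- the result list of A's loop + final flush, flattened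
def finishFlat (st : List (List Char) × List Char) : List Char :=
  (if st.2.isEmpty then st.1 else st.1 ++ [pyCapitalize st.2]).flatten

theorem finishFlat_eq (r : List (List Char)) (w : List Char) :
    finishFlat (r, w) = r.flatten ++ pyCapitalize w := by
  by_cases hw : w = []
  · simp [finishFlat, hw, pyCapitalize]
  · simp [finishFlat, List.isEmpty_iff, hw]

theorem main_lemma (cs : List Char) : ∀ (r : List (List Char)) (w : List Char) (p : Char),
    sepB p = w.isEmpty →
    finishFlat (List.foldl stepA (r, w) cs) = r.flatten ++ pyCapitalize w ++ rendB p cs := by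
  induction cs with
  | nil => intro r w p _; simp [rendB, finishFlat_eq]
  | cons c cs ih =>
      intro r w p hp
      by_cases hs : sepB c = true
      · simp only [List.foldl, stepA, hs, if_true]
        rw [ih _ [] c (by simp [hs]), rendB]
        obtain ⟨hu, hl⟩ := sep_fixed c hs
        by_cases hw : w = []
        · simp [hw, pyCapitalize, hp ▸ (by simp [hw] : w.isEmpty = true), hu]
        · simp only [List.isEmpty_iff, hw, if_false]
          have hpn : sepB p = false := by rw [hp]; simp [List.isEmpty_iff, hw]
          simp [pyCapitalize, hpn, hl]
      · simp only [List.foldl, stepA, hs, Bool.false_eq_true, if_false]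
        rw [ih _ (w ++ [c]) c (by simp [hs]), rendB]
        cases w with
        | nil =>
            have : sepB p = true := by rw [hp]; rfl
            simp [pyCapitalize, this]
        | cons x xs =>
            have hpn : sepB p = false := by rw [hp]; rfl
            simp [pyCapitalize, hpn]

-- ===== VERDICT =====
theorem to_title_case_py_spec : Claim_equal_to_title_case_py := by
  intro text _
  unfold Spec_to_title_case_py to_title_case_py to_title_case_py_alt
  by_cases ht : text = ""
  · subst ht; rfl
  · simp only [ht, if_false]
    rw [zip_map_eq_rendB]
    have h := main_lemma text.toList [] [] ' ' rfl
    unfold finishFlat at h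
    simp only [List.flatten_nil, List.nil_append, pyCapitalize] at h
    exact congrArg String.mk h
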